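-- pv_equiv track=rewrite | github.com/rahul-M-sdet/PythonProgram_practice_1 | segregate_string.py | segregate_char_num_special
-- ===== SOURCE A (Python) =====
-- def segregate_char_num_special(string):
--     chars=[]
--     nums=[]
--     specials=[]
--     for i in string:
--         if i.isalpha():
--             chars.append(i)
--         elif i.isdigit():
--             nums.append(i)
--         else:
--             specials.append(i)
--
--     return chars,nums,specials
-- ===== SOURCE B (Python) =====
-- def segregate_char_num_special(string):
--     def cat(c):
--         if c.isalpha():
--             return 0
--         if c.isdigit():
--             return 1
--         return 2
--     s = sorted(string, key=cat)
--     n0 = sum(1 for c in string if c.isalpha())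
--     n1 = sum(1 for c in string if c.isdigit())
--     return s[:n0], s[n0:n0 + n1], s[n0 + n1:]
-- ===== Notes on version B (the rewrite author's own statement) =====
-- stated objective: alternative
-- what changed: Instead of classifying each character into three accumulator lists in one loop, B stably sorts the characters by a 3-valued category key and then splits the sorted list into the three segments at positions computed from the category counts; Python's sort stability preserves the original relative order within each category.
import Mathlib
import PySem

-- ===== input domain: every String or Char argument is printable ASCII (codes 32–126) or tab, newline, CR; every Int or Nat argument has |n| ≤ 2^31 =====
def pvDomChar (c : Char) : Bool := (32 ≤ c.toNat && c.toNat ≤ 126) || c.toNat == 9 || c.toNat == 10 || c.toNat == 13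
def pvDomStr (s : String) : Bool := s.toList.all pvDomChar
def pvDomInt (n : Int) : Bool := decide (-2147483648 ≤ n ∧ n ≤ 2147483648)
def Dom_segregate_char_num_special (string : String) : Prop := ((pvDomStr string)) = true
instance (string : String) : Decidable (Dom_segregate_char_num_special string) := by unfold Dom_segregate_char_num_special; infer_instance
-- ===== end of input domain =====

-- B replaces A's single classifying loop by a stable sort on a 3-valued category key followed by
-- splitting the sorted list at the category counts (alternative algorithm, not claimed faster).


-- ===== PORT A =====
def segregate_char_num_special (string : String) : List String × List String × List String :=
  string.toList.foldl
    (fun (acc : List String × List String × List String) i =>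
      if PySem.Chars.isalpha i then (acc.1 ++ [String.ofList [i]], acc.2.1, acc.2.2)
      else if PySem.Chars.isdigit i then (acc.1, acc.2.1 ++ [String.ofList [i]], acc.2.2)
      else (acc.1, acc.2.1, acc.2.2 ++ [String.ofList [i]]))
    ([], [], [])

-- ===== PORT B =====
-- B's inner helper `cat`: the 3-valued category key
def pvCat (c : Char) : Int :=
  if PySem.Chars.isalpha c then 0
  else if PySem.Chars.isdigit c then 1
  else 2

def segregate_char_num_special_alt (string : String) : List String × List String × List String :=
  let s := (PySem.List.sorted string.toList pvCat false).map (fun c => String.ofList [c])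
  let n0 : Int := string.toList.foldl (fun a c => if PySem.Chars.isalpha c then a + 1 else a) 0
  let n1 : Int := string.toList.foldl (fun a c => if PySem.Chars.isdigit c then a + 1 else a) 0
  (PySem.List.slice s none (some n0),
   PySem.List.slice s (some n0) (some (n0 + n1)),
   PySem.List.slice s (some (n0 + n1)) none)

-- ===== PRECONDITION & SPEC =====
def Spec_segregate_char_num_special (string : String) (out : List String × List String × List String) : Prop := out = segregate_char_num_special_alt string
instance (string : String) (out : List String × List String × List String) : Decidable (Spec_segregate_char_num_special string out) := by unfold Spec_segregate_char_num_special; infer_instance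

-- ===== CLAIM (what is proved, stated in full; the proofs are below) =====
def Claim_equal_segregate_char_num_special : Prop := ∀ (string : String), Dom_segregate_char_num_special string → Spec_segregate_char_num_special string (segregate_char_num_special string)

-- ===== LEMMAS AND PROOFS =====

-- an alphabetic ASCII character is not a digit
theorem alpha_not_digit (c : Char) (h : PySem.Chars.isalpha c = true) : PySem.Chars.isdigit c = false := by
  simp [PySem.Chars.isalpha, PySem.Chars.isupper, PySem.Chars.islower, Char.le_def] at h
  simp [PySem.Chars.isdigit, Char.le_def]
  simp only [UInt32.le_iff_toNat_le, UInt32.lt_iff_toNat_lt] at h ⊢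
  have e1 : UInt32.toNat 48 = 48 := rfl
  have e2 : UInt32.toNat 57 = 57 := rfl
  have e3 : UInt32.toNat 65 = 65 := rfl
  have e4 : UInt32.toNat 90 = 90 := rfl
  have e5 : UInt32.toNat 97 = 97 := rfl
  have e6 : UInt32.toNat 122 = 122 := rfl
  omega

-- loop invariant of A: folding A's step appends the three filters
theorem seg_foldl_inv (l : List Char) (cs ns ss : List String) :
    l.foldl
      (fun (acc : List String × List String × List String) i =>
        if PySem.Chars.isalpha i then (acc.1 ++ [String.ofList [i]], acc.2.1, acc.2.2)
        else if PySem.Chars.isdigit i then (acc.1, acc.2.1 ++ [String.ofList [i]], acc.2.2)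
        else (acc.1, acc.2.1, acc.2.2 ++ [String.ofList [i]]))
      (cs, ns, ss)
    = (cs ++ (l.filter (fun c => PySem.Chars.isalpha c)).map (fun c => String.ofList [c]),
       ns ++ (l.filter (fun c => PySem.Chars.isdigit c)).map (fun c => String.ofList [c]),
       ss ++ (l.filter (fun c => !PySem.Chars.isalpha c && !PySem.Chars.isdigit c)).map (fun c => String.ofList [c])) := by
  induction l generalizing cs ns ss with
  | nil => simp
  | cons c l ih =>
    by_cases ha : PySem.Chars.isalpha c
    · have hd := alpha_not_digit c ha
      simp [List.foldl, ha, hd, ih, List.filter]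
    · by_cases hd : PySem.Chars.isdigit c
      · simp [List.foldl, ha, hd, ih, List.filter]
      · simp [List.foldl, ha, hd, ih, List.filter]

-- inserting an element whose key precedes everything puts it in front
theorem ins_all {α : Type} (bef : α → α → Bool) (x : α) (zs : List α)
    (h : ∀ z ∈ zs, bef x z = true) : PySem.List.insertBy bef x zs = x :: zs := by
  cases zs with
  | nil => rfl
  | cons z t => simp [PySem.List.insertBy, h z (by simp)]

-- stable insert skips a prefix none of whose elements the new element precedes
theorem ins_skip {α : Type} (bef : α → α → Bool) (x : α) (ys zs : List α)
    (h : ∀ y ∈ ys, bef x y = false) :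
    PySem.List.insertBy bef x (ys ++ zs) = ys ++ PySem.List.insertBy bef x zs := by
  induction ys with
  | nil => rfl
  | cons y t ih =>
    have hy : bef x y = false := h y (by simp)
    simp [PySem.List.insertBy, hy]
    exact ih (fun y hy => h y (by simp [hy]))

-- inserting an element that precedes nothing appends it at the end
theorem ins_last {α : Type} (bef : α → α → Bool) (x : α) (ys : List α)
    (h : ∀ y ∈ ys, bef x y = false) : PySem.List.insertBy bef x ys = ys ++ [x] := by
  induction ys with
  | nil => rfl
  | cons y t ih =>
    simp [PySem.List.insertBy, h y (by simp)]
    exact ih (fun z hz => h z (by simp [hz]))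

-- the stable insertion sort by pvCat, started from three sorted buckets, yields the three filters
theorem sort3_inv (l g0 g1 g2 : List Char)
    (h0 : ∀ c ∈ g0, pvCat c = 0) (h1 : ∀ c ∈ g1, pvCat c = 1) (h2 : ∀ c ∈ g2, pvCat c = 2) :
    l.foldl (fun acc x => PySem.List.insertBy (fun a b => decide (pvCat a < pvCat b)) x acc)
      (g0 ++ g1 ++ g2)
    = (g0 ++ l.filter (fun c => decide (pvCat c = 0)))
      ++ (g1 ++ l.filter (fun c => decide (pvCat c = 1)))
      ++ (g2 ++ l.filter (fun c => decide (pvCat c = 2))) := by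
  induction l generalizing g0 g1 g2 with
  | nil => simp
  | cons x l ih =>
    have hcat : pvCat x = 0 ∨ pvCat x = 1 ∨ pvCat x = 2 := by
      unfold pvCat; split_ifs <;> simp
    rcases hcat with hx | hx | hx
    · have hins : PySem.List.insertBy (fun a b => decide (pvCat a < pvCat b)) x (g0 ++ g1 ++ g2)
          = (g0 ++ [x]) ++ g1 ++ g2 := by
        rw [List.append_assoc, ins_skip _ _ _ _ (fun y hy => by simp [hx, h0 y hy]),
            ins_all _ _ _ (fun z hz => by
              rcases List.mem_append.mp hz with hz | hz
              · simp [hx, h1 z hz]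
              · simp [hx, h2 z hz])]
        simp
      have hg0 : ∀ c ∈ g0 ++ [x], pvCat c = 0 :=
        List.forall_mem_append.mpr ⟨h0, fun c hc => by simp at hc; simp [hc, hx]⟩
      rw [List.foldl_cons, hins, ih (g0 ++ [x]) g1 g2 hg0 h1 h2]
      simp [hx]
    · have hins : PySem.List.insertBy (fun a b => decide (pvCat a < pvCat b)) x (g0 ++ g1 ++ g2)
          = g0 ++ (g1 ++ [x]) ++ g2 := by
        rw [List.append_assoc, ins_skip _ _ _ _ (fun y hy => by simp [hx, h0 y hy]),
            ins_skip _ _ _ _ (fun y hy => by simp [hx, h1 y hy]),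
            ins_all _ _ _ (fun z hz => by simp [hx, h2 z hz])]
        simp
      have hg1 : ∀ c ∈ g1 ++ [x], pvCat c = 1 :=
        List.forall_mem_append.mpr ⟨h1, fun c hc => by simp at hc; simp [hc, hx]⟩
      rw [List.foldl_cons, hins, ih g0 (g1 ++ [x]) g2 h0 hg1 h2]
      simp [hx]
    · have hins : PySem.List.insertBy (fun a b => decide (pvCat a < pvCat b)) x (g0 ++ g1 ++ g2)
          = g0 ++ g1 ++ (g2 ++ [x]) := by
        rw [ins_skip _ _ _ _ (fun y hy => by
              rcases List.mem_append.mp hy with h | h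
              · simp [hx, h0 y h]
              · simp [hx, h1 y h]),
            ins_last _ _ _ (fun y hy => by simp [hx, h2 y hy])]
      have hg2 : ∀ c ∈ g2 ++ [x], pvCat c = 2 :=
        List.forall_mem_append.mpr ⟨h2, fun c hc => by simp at hc; simp [hc, hx]⟩
      rw [List.foldl_cons, hins, ih g0 g1 (g2 ++ [x]) h0 h1 hg2]
      simp [hx]

-- the three decide-filters are A's three predicate filters
theorem filter_cat0 (l : List Char) :
    l.filter (fun c => decide (pvCat c = 0)) = l.filter (fun c => PySem.Chars.isalpha c) :=
  List.filter_congr (fun c _ => by unfold pvCat; split_ifs with h1 h2 <;> simp [h1])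

theorem filter_cat1 (l : List Char) :
    l.filter (fun c => decide (pvCat c = 1)) = l.filter (fun c => PySem.Chars.isdigit c) :=
  List.filter_congr (fun c _ => by
    unfold pvCat; split_ifs with h1 h2
    · simp [alpha_not_digit c h1]
    · simp [h2]
    · simp [h2])

theorem filter_cat2 (l : List Char) :
    l.filter (fun c => decide (pvCat c = 2))
      = l.filter (fun c => !PySem.Chars.isalpha c && !PySem.Chars.isdigit c) :=
  List.filter_congr (fun c _ => by
    unfold pvCat; split_ifs with h1 h2
    · simp [h1]
    · simp [h1, h2]
    · simp [h1, h2])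

-- the sorted list is the concatenation of the three filters
theorem sorted_pvCat (l : List Char) :
    PySem.List.sorted l pvCat false
    = l.filter (fun c => PySem.Chars.isalpha c)
      ++ l.filter (fun c => PySem.Chars.isdigit c)
      ++ l.filter (fun c => !PySem.Chars.isalpha c && !PySem.Chars.isdigit c) := by
  rw [PySem.List.sorted_eq_foldl_insertBy]
  have h := sort3_inv l [] [] [] (by simp) (by simp) (by simp)
  simp only [List.nil_append, List.append_nil] at h
  rw [h, filter_cat0, filter_cat1, filter_cat2]

-- ===== VERDICT (by name: the statement is the Claim_ definition above) =====
theorem segregate_char_num_special_spec : Claim_equal_segregate_char_num_special := by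
  intro s _
  unfold Spec_segregate_char_num_special segregate_char_num_special segregate_char_num_special_alt
  rw [seg_foldl_inv s.toList [] [] []]
  simp only [List.nil_append]
  rw [PySem.List.foldl_if_add_one, PySem.List.foldl_if_add_one, sorted_pvCat]
  set l := s.toList with hl
  set f0 := l.filter (fun c => PySem.Chars.isalpha c) with hf0
  set f1 := l.filter (fun c => PySem.Chars.isdigit c) with hf1
  set f2 := l.filter (fun c => !PySem.Chars.isalpha c && !PySem.Chars.isdigit c) with hf2
  have hc0 : (l.countP (fun c => PySem.Chars.isalpha c)) = f0.length := by
    simp [hf0, List.countP_eq_length_filter]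
  have hc1 : (l.countP (fun c => PySem.Chars.isdigit c)) = f1.length := by
    simp [hf1, List.countP_eq_length_filter]
  simp only [List.map_append, zero_add, hc0, hc1]
  refine Prod.ext ?_ (Prod.ext ?_ ?_)
  · rw [PySem.List.slice_to_natCast]
    simp
  · rw [show ((f0.length : Int) + (f1.length : Int)) = ((f0.length : Int) + ((f1.length : Nat) : Int)) from rfl,
        PySem.List.slice_natCast_add]
    simp
  · rw [show ((f0.length : Int) + (f1.length : Int)) = (((f0.length + f1.length : Nat) : Int)) by norm_cast,
        PySem.List.slice_from_natCast]
    simp [List.drop_append]
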